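-- pv_equiv track=rewrite | github.com/wildwoodwaltz/data-structures-and-algorithms | python/code_challenges/roman_numerals.py | numeral_converter
-- ===== SOURCE A (Python) =====
-- def numeral_converter(numeral):
--     """
--     Function Takes in a string of roman numerals and converts them to arabic numerals
--     """
--     arabic_number = 0
--
--     for idx in range(len(numeral) - 1):
--
--         left_num = numeral[idx]
--         right_num = numeral[idx + 1]
--
--         left_val = convert(left_num)
--         right_val = convert(right_num)
--
--         if left_val < right_val:
--             left_val = -left_val
--
--         arabic_number += left_val
--
--     if numeral:
--         arabic_number += convert(numeral[-1])
--
--     return arabic_number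
--
-- def convert(rom_num):
--     legend = {
--         "M": 1000,
--         "D": 500,
--         "C": 100,
--         "L": 50,
--         "X": 10,
--         "V": 5,
--         "I": 1
--         }
--
--     return legend.get(rom_num,0)
-- ===== SOURCE B (Python) =====
-- ROMAN = {"M": 1000, "D": 500, "C": 100, "L": 50, "X": 10, "V": 5, "I": 1}
--
-- def numeral_converter(numeral):
--     total = 0
--     prev = 0
--     for ch in reversed(numeral):
--         v = ROMAN.get(ch, 0)
--         if v < prev:
--             total -= v
--         else:
--             total += v
--         prev = v
--     return total
-- ===== Notes on version B (the rewrite author's own statement) =====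
-- stated objective: simpler
-- what changed: Single backward pass keeping the previous character's value, instead of a forward index loop with lookahead plus separate last-character handling; the legend dict is a module constant built once rather than rebuilt on every convert() call.
import Mathlib
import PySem

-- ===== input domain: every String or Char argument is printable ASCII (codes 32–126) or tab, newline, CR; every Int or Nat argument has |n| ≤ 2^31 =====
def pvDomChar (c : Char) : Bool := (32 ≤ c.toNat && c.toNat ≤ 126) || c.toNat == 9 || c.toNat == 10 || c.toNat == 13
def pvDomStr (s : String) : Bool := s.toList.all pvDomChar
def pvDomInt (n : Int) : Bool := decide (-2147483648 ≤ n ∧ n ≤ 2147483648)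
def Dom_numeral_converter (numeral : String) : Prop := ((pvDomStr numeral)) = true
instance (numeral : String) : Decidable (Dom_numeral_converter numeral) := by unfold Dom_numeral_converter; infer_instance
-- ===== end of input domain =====

-- B replaces A's forward index loop with lookahead (plus separate last-character handling) by a
-- single backward pass that remembers the previous value; objective: simpler.

-- ===== PORT A =====
def convert (rom_num : Char) : Int :=
  let legend : PySem.Dict Char Int :=
    PySem.Dict.ofList [('M', 1000), ('D', 500), ('C', 100), ('L', 50), ('X', 10), ('V', 5), ('I', 1)]
  legend.getD rom_num 0

def numeral_converter (numeral : String) : Int :=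
  let cs := numeral.toList
  let arabic_number : Int :=
    (PySem.List.pyRange 0 ((cs.length : Int) - 1) 1).foldl
      (fun arabic_number idx =>
        let left_num := PySem.List.pyGetD cs idx ' '
        let right_num := PySem.List.pyGetD cs (idx + 1) ' '
        let left_val := convert left_num
        let right_val := convert right_num
        let left_val := if left_val < right_val then -left_val else left_val
        arabic_number + left_val) 0
  if cs ≠ [] then arabic_number + convert (PySem.List.pyGetD cs (-1) ' ') else arabic_number

-- ===== PORT B =====
def romanVal (c : Char) : Int :=
  (PySem.Dict.ofList [('M', 1000), ('D', 500), ('C', 100), ('L', 50), ('X', 10), ('V', 5), ('I', 1)] :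
    PySem.Dict Char Int).getD c 0

def altGo : List Char → Int → Int → Int
  | [], _, total => total
  | c :: rest, prev, total =>
      let v := romanVal c
      altGo rest v (if v < prev then total - v else total + v)

def numeral_converter_alt (numeral : String) : Int :=
  altGo numeral.toList.reverse 0 0

-- ===== PRECONDITION & SPEC =====
def Spec_numeral_converter (numeral : String) (out : Int) : Prop := out = numeral_converter_alt numeral
instance (numeral : String) (out : Int) : Decidable (Spec_numeral_converter numeral out) := by unfold Spec_numeral_converter; infer_instance

-- ===== CLAIM (what is proved, stated in full; the proofs are below) =====
def Claim_equal_numeral_converter : Prop := ∀ (numeral : String), Dom_numeral_converter numeral → Spec_numeral_converter numeral (numeral_converter numeral)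

-- ===== LEMMAS AND PROOFS =====

-- value added for one character, given the value `r` of its right neighbour (0 if none)
def rstep (l r : Int) : Int := if l < r then -l else l

-- A's subtraction rule written as structural recursion on the string, with `p` the value to the
-- right of the whole string (both programs use 0 there).
def fwd : List Char → Int → Int
  | [], _ => 0
  | [c], p => rstep (romanVal c) p
  | a :: b :: rest, p => rstep (romanVal a) (romanVal b) + fwd (b :: rest) p

-- the adjacent-pair part of A (everything except the last character's term)
def pairSum : List Char → Int
  | [] => 0
  | [_] => 0
  | a :: b :: rest => rstep (romanVal a) (romanVal b) + pairSum (b :: rest)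

-- prev-value after B has processed `xs`, starting from `p`
def lastVal : List Char → Int → Int
  | [], p => p
  | c :: rest, _ => lastVal rest (romanVal c)

theorem convert_eq_romanVal (c : Char) : convert c = romanVal c := rfl

theorem romanVal_nonneg (c : Char) : 0 ≤ romanVal c := by
  simp [romanVal, PySem.Dict.getD, PySem.Dict.ofList, PySem.Dict.update, PySem.Dict.insert,
    PySem.Dict.empty, PySem.Dict.get?, List.find?_cons]
  repeat' split
  all_goals simp

theorem lastVal_append (xs : List Char) (c : Char) (p : Int) :
    lastVal (xs ++ [c]) p = romanVal c := by
  induction xs generalizing p with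
  | nil => rfl
  | cons x xs ih => simp [lastVal, ih]

theorem altGo_append (xs : List Char) (c : Char) (p t : Int) :
    altGo (xs ++ [c]) p t = altGo xs p t + rstep (romanVal c) (lastVal xs p) := by
  induction xs generalizing p t with
  | nil => simp [altGo, lastVal, rstep]; split <;> ring
  | cons x xs ih => simp [altGo, lastVal, ih]

theorem altGo_reverse (cs : List Char) (p : Int) :
    altGo cs.reverse p 0 = fwd cs p := by
  induction cs generalizing p with
  | nil => rfl
  | cons a cs ih =>
    rw [List.reverse_cons, altGo_append, ih]
    cases cs with
    | nil => simp [fwd, lastVal]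
    | cons b rest =>
      rw [List.reverse_cons, lastVal_append]
      simp [fwd]; ring

theorem fwd_zero (cs : List Char) :
    fwd cs 0 = pairSum cs + (if cs = [] then 0 else romanVal (PySem.List.pyGetD cs (-1) ' ')) := by
  induction cs with
  | nil => rfl
  | cons a cs ih =>
    cases cs with
    | nil =>
      have h := romanVal_nonneg a
      rw [PySem.List.pyGetD_neg_one (h := by simp)]
      simp [fwd, pairSum, rstep]
      omega
    | cons b rest =>
      rw [fwd, pairSum, ih]
      have h1 : PySem.List.pyGetD (a :: b :: rest) (-1) ' ' = PySem.List.pyGetD (b :: rest) (-1) ' ' := by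
        rw [PySem.List.pyGetD_neg_one (h := by simp), PySem.List.pyGetD_neg_one (h := by simp)]
        simp [List.getLast]
      simp [h1]; ring

theorem rangeFold_eq_pairSum (cs : List Char) (t : Int) :
    (List.range (cs.length - 1)).foldl
      (fun acc k => acc + rstep (romanVal (cs.getD k ' ')) (romanVal (cs.getD (k + 1) ' '))) t
      = t + pairSum cs := by
  induction cs generalizing t with
  | nil => simp [pairSum]
  | cons a cs ih =>
    cases cs with
    | nil => simp [pairSum]
    | cons b rest =>
      have hlen : (a :: b :: rest).length - 1 = rest.length + 1 := by simp
      rw [hlen, List.range_succ_eq_map, List.foldl_cons, List.foldl_map]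
      have hfun : (fun (acc : Int) (k : Nat) =>
          acc + rstep (romanVal ((a :: b :: rest).getD (k + 1) ' '))
                      (romanVal ((a :: b :: rest).getD (k + 1 + 1) ' ')))
          = (fun (acc : Int) (k : Nat) =>
          acc + rstep (romanVal ((b :: rest).getD k ' ')) (romanVal ((b :: rest).getD (k + 1) ' '))) := by
        funext acc k
        simp
      have hlen2 : rest.length = (b :: rest).length - 1 := by simp
      simp only [Nat.succ_eq_add_one, hfun, hlen2]
      rw [ih]
      simp [pairSum]
      ring

theorem Afold_eq (cs : List Char) (t : Int) :
    (PySem.List.pyRange 0 ((cs.length : Int) - 1) 1).foldl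
      (fun acc idx => acc +
        (if convert (PySem.List.pyGetD cs idx ' ') < convert (PySem.List.pyGetD cs (idx + 1) ' ')
         then -convert (PySem.List.pyGetD cs idx ' ')
         else convert (PySem.List.pyGetD cs idx ' '))) t
    = t + pairSum cs := by
  rw [PySem.List.pyRange_one, List.foldl_map]
  have hfun : (fun (acc : Int) (k : Nat) => acc +
        (if convert (PySem.List.pyGetD cs (0 + (k : Int)) ' ') < convert (PySem.List.pyGetD cs (0 + (k : Int) + 1) ' ')
         then -convert (PySem.List.pyGetD cs (0 + (k : Int)) ' ')
         else convert (PySem.List.pyGetD cs (0 + (k : Int)) ' ')))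
      = (fun (acc : Int) (k : Nat) =>
        acc + rstep (romanVal (cs.getD k ' ')) (romanVal (cs.getD (k + 1) ' '))) := by
    funext acc k
    have h1 : (0 : Int) + (k : Int) = ((k : Nat) : Int) := by omega
    have h2 : (k : Int) + 1 = ((k + 1 : Nat) : Int) := by push_cast; omega
    rw [h1, h2, PySem.List.pyGetD_natCast, PySem.List.pyGetD_natCast]
    rfl
  have hlen : (((cs.length : Int) - 1) - 0).toNat = cs.length - 1 := by omega
  rw [hlen, hfun, rangeFold_eq_pairSum]

-- ===== VERDICT (by name: the statement is the Claim_ definition above) =====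
theorem numeral_converter_spec : Claim_equal_numeral_converter := by
  intro numeral _
  unfold Spec_numeral_converter numeral_converter numeral_converter_alt
  rw [altGo_reverse, fwd_zero]
  simp only [Afold_eq, zero_add]
  by_cases h : numeral.toList = []
  · simp [h, pairSum]
  · simp only [h, ne_eq, not_false_iff, if_true, if_false]
    rw [convert_eq_romanVal]
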